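-- pv_equiv track=rewrite | github.com/lttcmd/pineappleRLH200x8 | tests/test_sfl_policy.py | sample_cards
-- ===== SOURCE A (Python) =====
-- MASK64 = (1 << 64) - 1
--
-- def mix64(z):
--     z &= MASK64
--     z ^= (z >> 12)
--     z &= MASK64
--     z ^= (z << 25) & MASK64
--     z ^= (z >> 27)
--     z &= MASK64
--     return (z * 2685821657736338717) & MASK64
--
-- def sample_cards(seed, sample_idx, deck, take):
--     pool = list(deck)
--     chosen = []
--     state = (seed + 0x9E3779B97F4A7C15 * (sample_idx + 1)) & MASK64
--     for i in range(take):
--         if not pool: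
--             break
--         state = mix64(state + i + 1)
--         idx = int(state % len(pool))
--         chosen.append(pool.pop(idx))
--     return chosen
-- ===== SOURCE B (Python) =====
-- MASK64 = (1 << 64) - 1
--
-- def mix64(z):
--     z &= MASK64
--     z ^= (z >> 12)
--     z &= MASK64
--     z ^= (z << 25) & MASK64
--     z ^= (z >> 27)
--     z &= MASK64
--     return (z * 2685821657736338717) & MASK64
--
-- def sample_cards(seed, sample_idx, deck, take):
--     # Same RNG stream; but instead of popping from a copied pool (an O(n) list
--     # deletion per draw), keep the deck immutable and maintain a sorted list of
--     # already-taken positions.  The idx-th remaining card sits at original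
--     # position idx + k, where k (the number of taken positions interleaved
--     # below it) is found by binary search; k is also the insertion point that
--     # keeps the taken-list sorted.
--     n = len(deck)
--     removed = []   # sorted original positions already taken
--     chosen = []
--     state = (seed + 0x9E3779B97F4A7C15 * (sample_idx + 1)) & MASK64
--     for i in range(take):
--         remaining = n - len(removed)
--         if remaining == 0:
--             break
--         state = mix64(state + i + 1)
--         idx = state % remaining
--         lo = 0
--         hi = len(removed)
--         while lo < hi:
--             mid = (lo + hi) // 2
--             if removed[mid] <= idx + mid:
--                 lo = mid + 1
--             else:
--                 hi = mid
--         pos = idx + lo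
--         chosen.append(deck[pos])
--         removed.insert(lo, pos)
--     return chosen
-- ===== Notes on version B (the rewrite author's own statement) =====
-- stated objective: alternative
-- what changed: B never copies or shrinks the deck: instead of pool.pop(idx) it keeps the deck immutable and maintains a sorted list of the positions already taken, finding the idx-th remaining card's original position (and the matching insertion point) by binary search over that list.
import Mathlib
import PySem

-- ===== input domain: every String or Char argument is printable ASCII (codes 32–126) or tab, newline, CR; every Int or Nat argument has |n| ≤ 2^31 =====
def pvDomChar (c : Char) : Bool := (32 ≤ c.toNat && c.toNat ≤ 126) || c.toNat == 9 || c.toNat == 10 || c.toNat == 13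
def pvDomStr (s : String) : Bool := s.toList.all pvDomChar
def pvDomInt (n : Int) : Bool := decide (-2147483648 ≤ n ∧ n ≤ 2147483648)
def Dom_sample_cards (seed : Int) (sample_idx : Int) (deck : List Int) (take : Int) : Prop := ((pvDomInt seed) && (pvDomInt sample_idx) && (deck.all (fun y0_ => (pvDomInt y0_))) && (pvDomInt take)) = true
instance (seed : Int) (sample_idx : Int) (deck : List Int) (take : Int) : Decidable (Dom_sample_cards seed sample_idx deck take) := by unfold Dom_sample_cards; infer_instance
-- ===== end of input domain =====

-- B replaces A's pool copied from the deck and shrunk by pop(idx) with an immutable deck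
-- plus a sorted list of the positions already taken: each random index is translated to an
-- original-deck position by binary search over that list; same RNG stream, same result.

-- ===== PORT A =====
def pvMASK64 : Int := (1 <<< 64) - 1

def mix64 (z0 : Int) : Int :=
  let z1 := PySem.Int.band z0 pvMASK64
  let z2 := PySem.Int.bxor z1 (z1 >>> 12)
  let z3 := PySem.Int.band z2 pvMASK64
  let z4 := PySem.Int.bxor z3 (PySem.Int.band (z3 <<< 25) pvMASK64)
  let z5 := PySem.Int.bxor z4 (z4 >>> 27)
  let z6 := PySem.Int.band z5 pvMASK64
  PySem.Int.band (z6 * 2685821657736338717) pvMASK64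

-- the for-loop of A: fuel = remaining iterations, i = current loop counter
def sampleLoopA (pool chosen : List Int) (state : Int) (i : Nat) : Nat → List Int
  | 0 => chosen
  | fuel + 1 =>
    if pool.isEmpty then chosen
    else
      let st := mix64 (state + (i : Int) + 1)
      let idx := PySem.Int.mod st (pool.length : Int)
      -- pool.pop(idx): the pool is nonempty and 0 ≤ state % len(pool) < len(pool),
      -- so pop? is always `some`; the .getD default is unreachable
      let vr := (PySem.List.pop? pool idx).getD (0, [])
      sampleLoopA vr.2 (chosen ++ [vr.1]) st (i + 1) fuel

def sample_cards (seed : Int) (sample_idx : Int) (deck : List Int) (take : Int) : List Int :=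
  let state := PySem.Int.band (seed + 0x9E3779B97F4A7C15 * (sample_idx + 1)) pvMASK64
  sampleLoopA deck [] state 0 take.toNat

-- ===== PORT B =====
-- Source B's binary-search while-loop: smallest k in [lo, hi) with removed[k] > idx + k
-- (removed[mid] is always in range: mid < hi ≤ len(removed), so getD's default is unreachable)
def bsLoop (removed : List Nat) (idx : Nat) (lo hi : Nat) : Nat :=
  if lo < hi then
    let mid := (lo + hi) / 2
    if removed.getD mid 0 ≤ idx + mid then bsLoop removed idx (mid + 1) hi
    else bsLoop removed idx lo mid
  else lo
termination_by hi - lo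
decreasing_by all_goals omega

def sampleLoopB (deck : List Int) (n : Nat) (removed : List Nat) (chosen : List Int) (state : Int) (i : Nat) : Nat → List Int
  | 0 => chosen
  | fuel + 1 =>
    let remaining := n - removed.length
    if remaining = 0 then chosen
    else
      let st := mix64 (state + (i : Int) + 1)
      let idx := (PySem.Int.mod st (remaining : Int)).toNat
      let lo := bsLoop removed idx 0 removed.length
      let pos := idx + lo
      -- deck[pos]: pos < n always holds here, so getD's default is unreachable
      sampleLoopB deck n (PySem.List.insert removed (lo : Int) pos) (chosen ++ [deck.getD pos 0]) st (i + 1) fuel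

def sample_cards_alt (seed : Int) (sample_idx : Int) (deck : List Int) (take : Int) : List Int :=
  let state := PySem.Int.band (seed + 0x9E3779B97F4A7C15 * (sample_idx + 1)) pvMASK64
  sampleLoopB deck deck.length [] [] state 0 take.toNat

-- ===== PRECONDITION & SPEC =====
def Spec_sample_cards (seed : Int) (sample_idx : Int) (deck : List Int) (take : Int) (out : List Int) : Prop := out = sample_cards_alt seed sample_idx deck take
instance (seed : Int) (sample_idx : Int) (deck : List Int) (take : Int) (out : List Int) : Decidable (Spec_sample_cards seed sample_idx deck take out) := by unfold Spec_sample_cards; infer_instance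

-- ===== CLAIM (what is proved, stated in full; the proofs are below) =====
def Claim_equal_sample_cards : Prop := ∀ (seed : Int) (sample_idx : Int) (deck : List Int) (take : Int), Dom_sample_cards seed sample_idx deck take → Spec_sample_cards seed sample_idx deck take (sample_cards seed sample_idx deck take)

-- ===== LEMMAS AND PROOFS =====

theorem mix64_nonneg (z : Int) : 0 ≤ mix64 z := by
  simp only [mix64]
  rw [PySem.Int.band_comm]
  exact PySem.Int.band_nonneg_of_nonneg_left _ (by decide)

-- scan characterisation of the binary search: walk the sorted removed positions,
-- bumping the index past each taken position ≤ it (proof-side only)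
def pvTranslate : List Nat → Nat → Nat
  | [], p => p
  | d :: ds, p => if d ≤ p then pvTranslate ds (p + 1) else p

-- sorted insertion (proof-side characterisation of inserting at the bsLoop index)
def pvInsertSorted (p : Nat) : List Nat → List Nat
  | [] => [p]
  | d :: ds => if d < p then d :: pvInsertSorted p ds else p :: d :: ds

theorem mem_insertSorted (p j : Nat) (l : List Nat) :
    j ∈ pvInsertSorted p l ↔ j = p ∨ j ∈ l := by
  induction l with
  | nil => simp [pvInsertSorted]
  | cons d ds ih =>
    by_cases h : d < p
    · rw [pvInsertSorted, if_pos h]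
      simp only [List.mem_cons, ih]
      tauto
    · rw [pvInsertSorted, if_neg h]
      simp only [List.mem_cons]

theorem pairwise_insertSorted (p : Nat) (l : List Nat)
    (hs : l.Pairwise (· < ·)) (hp : p ∉ l) :
    (pvInsertSorted p l).Pairwise (· < ·) := by
  induction l with
  | nil => simp [pvInsertSorted]
  | cons d ds ih =>
    rcases List.pairwise_cons.mp hs with ⟨hd, hds⟩
    by_cases h : d < p
    · rw [pvInsertSorted, if_pos h]
      refine List.pairwise_cons.mpr ⟨?_, ih hds (fun hm => hp (by simp [hm]))⟩
      intro b hb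
      rcases (mem_insertSorted p b ds).mp hb with rfl | hb
      · exact h
      · exact hd b hb
    · rw [pvInsertSorted, if_neg h]
      have hpd : p < d := by
        rcases Nat.lt_or_ge p d with h1 | h1
        · exact h1
        · exfalso; exact hp (by simp [Nat.le_antisymm (Nat.le_of_not_lt h) h1])
      refine List.pairwise_cons.mpr ⟨?_, hs⟩
      intro b hb
      rcases List.mem_cons.mp hb with rfl | hb
      · exact hpd
      · exact Nat.lt_trans hpd (hd b hb)


theorem filter_ne_eq_eraseIdx {α : Type} [DecidableEq α] (l : List α) (idx : Nat) (a : α)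
    (hnd : l.Nodup) (hget : l[idx]? = some a) :
    l.filter (fun x => x ≠ a) = l.eraseIdx idx := by
  induction l generalizing idx with
  | nil => simp at hget
  | cons b t ih =>
    rcases List.nodup_cons.mp hnd with ⟨hb, ht⟩
    cases idx with
    | zero =>
      simp only [List.getElem?_cons_zero, Option.some.injEq] at hget
      subst hget
      rw [List.eraseIdx_zero, List.tail_cons, List.filter_cons_of_neg (by simp)]
      exact List.filter_eq_self.mpr (fun x hx => by
        simp only [ne_eq, decide_eq_true_eq]
        exact fun he => hb (he ▸ hx))
    | succ k =>
      simp only [List.getElem?_cons_succ] at hget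
      have hba : b ≠ a := fun he => hb (he ▸ (List.mem_of_getElem? hget))
      rw [List.filter_cons_of_pos (by simp [hba]), ih k ht hget, List.eraseIdx_cons_succ]

-- positions of deck still available given the removed positions
def availIdx (n : Nat) (removed : List Nat) : List Nat :=
  (List.range n).filter (fun j => decide (j ∉ removed))

-- the pool A maintains, reconstructed from deck + removed positions
def selPool (deck : List Int) (removed : List Nat) : List Int :=
  (availIdx deck.length removed).map (fun j => deck.getD j 0)

theorem selPool_nil (deck : List Int) : selPool deck [] = deck := by
  simp only [selPool, availIdx, List.not_mem_nil, not_false_eq_true, decide_true, List.filter_true]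
  apply List.ext_getElem
  · simp
  · intro i h1 h2
    simp [List.getD_eq_getElem?_getD, List.getElem?_eq_getElem h2]

theorem range_split (n m : Nat) (h : m ≤ n) :
    List.range n = List.range m ++ List.range' m (n - m) := by
  conv_lhs => rw [show n = m + (n - m) by omega]
  rw [List.range_add, List.range'_eq_map_range]

theorem availIdx_prefix (n m : Nat) (removed : List Nat) (hm : m ≤ n)
    (hall : ∀ j < m, j ∉ removed) :
    availIdx n removed
      = List.range m ++ (List.range' m (n - m)).filter (fun j => decide (j ∉ removed)) := by
  rw [availIdx, range_split n m hm, List.filter_append]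
  congr 1
  apply List.filter_eq_self.mpr
  intro x hx
  simpa using hall x (List.mem_range.mp hx)

theorem length_availIdx (n : Nat) (removed : List Nat)
    (hnd : removed.Nodup) (hb : ∀ d ∈ removed, d < n) :
    (availIdx n removed).length = n - removed.length := by
  induction removed with
  | nil => simp [availIdx]
  | cons d ds ih =>
    rcases List.nodup_cons.mp hnd with ⟨hdds, hndds⟩
    have hcons : availIdx n (d :: ds) = (availIdx n ds).filter (fun j => decide (j ≠ d)) := by
      simp only [availIdx, List.filter_filter]
      apply List.filter_congr
      intro x _
      by_cases h1 : x = d <;> by_cases h2 : x ∈ ds <;> simp [h1, h2]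
    have hdmem : d ∈ availIdx n ds := by
      simp [availIdx, List.mem_filter, List.mem_range, hb d (by simp), hdds]
    obtain ⟨k, hk, hkd⟩ := List.mem_iff_getElem.mp hdmem
    have hfe := filter_ne_eq_eraseIdx (availIdx n ds) k d (List.nodup_range.filter _)
      (by rw [List.getElem?_eq_getElem hk, hkd])
    have hih := ih hndds (fun e he => hb e (by simp [he]))
    rw [hcons, hfe, List.length_eraseIdx_of_lt hk, hih]
    simp only [List.length_cons]
    omega

theorem availIdx_get (removed : List Nat) : ∀ (n idx : Nat),
    removed.Pairwise (· < ·) → (∀ d ∈ removed, d < n) →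
    idx < n - removed.length →
    (availIdx n removed)[idx]? = some (pvTranslate removed idx) := by
  induction removed with
  | nil =>
    intro n idx _ _ hidx
    simp only [availIdx, List.not_mem_nil, not_false_eq_true, decide_true, List.filter_true]
    rw [List.getElem?_range (by simpa using hidx)]
    rfl
  | cons d ds ih =>
    intro n idx hs hb hidx
    rcases List.pairwise_cons.mp hs with ⟨hd, hds⟩
    have hdn : d < n := hb d (by simp)
    have hbds : ∀ e ∈ ds, e < n := fun e he => hb e (by simp [he])
    have hlcons : (d :: ds).length = ds.length + 1 := rfl
    -- both lists share the same suffix T past position d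
    have eq1 : availIdx n (d :: ds)
        = List.range d ++ (List.range' (d+1) (n - d - 1)).filter (fun j => decide (j ∉ ds)) := by
      rw [availIdx_prefix n d (d :: ds) (by omega)
        (fun j hj => by
          intro hm
          rcases List.mem_cons.mp hm with rfl | hm
          · omega
          · exact absurd (hd j hm) (by omega))]
      congr 1
      rw [show n - d = (n - d - 1) + 1 by omega, List.range'_succ,
        List.filter_cons_of_neg (by simp)]
      apply List.filter_congr
      intro x hx
      have hx1 : d + 1 ≤ x := (List.mem_range'_1.mp hx).1
      by_cases h2 : x ∈ ds <;> simp [h2, show ¬ x = d by omega]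
    have eq2 : availIdx n ds
        = List.range (d+1) ++ (List.range' (d+1) (n - d - 1)).filter (fun j => decide (j ∉ ds)) := by
      rw [availIdx_prefix n (d+1) ds (by omega)
        (fun j hj hm => absurd (hd j hm) (by omega))]
      congr 2
    by_cases hc : d ≤ idx
    · have htr : pvTranslate (d :: ds) idx = pvTranslate ds (idx + 1) := by
        simp only [pvTranslate, if_pos hc]
      have hih := ih n (idx + 1) hds hbds (by rw [hlcons] at hidx; omega)
      rw [eq2, List.getElem?_append_right (by simp; omega)] at hih
      rw [eq1, List.getElem?_append_right (by simp; omega), htr]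
      simp only [List.length_range] at hih ⊢
      rw [show idx - d = idx + 1 - (d + 1) by omega]
      exact hih
    · have htr : pvTranslate (d :: ds) idx = idx := by
        simp only [pvTranslate, if_neg hc]
      rw [eq1, List.getElem?_append_left (by simp; omega), htr,
        List.getElem?_range (by omega)]

theorem availIdx_insertSorted (removed : List Nat) (n idx : Nat)
    (hs : removed.Pairwise (· < ·)) (hb : ∀ d ∈ removed, d < n)
    (hidx : idx < n - removed.length) :
    availIdx n (pvInsertSorted (pvTranslate removed idx) removed)
      = (availIdx n removed).eraseIdx idx := by
  have hget := availIdx_get removed n idx hs hb hidx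
  have hmem : pvTranslate removed idx ∈ availIdx n removed := List.mem_of_getElem? hget
  have hfilter : availIdx n (pvInsertSorted (pvTranslate removed idx) removed)
      = (availIdx n removed).filter (fun j => decide (j ≠ pvTranslate removed idx)) := by
    simp only [availIdx, List.filter_filter]
    apply List.filter_congr
    intro x _
    by_cases h1 : x = pvTranslate removed idx <;> by_cases h2 : x ∈ removed <;>
      simp [mem_insertSorted, h1, h2]
  have hnodup : (availIdx n removed).Nodup := by
    rw [availIdx]; exact List.nodup_range.filter _
  rw [hfilter, filter_ne_eq_eraseIdx (availIdx n removed) idx _ hnodup hget]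

theorem sampleLoopA_succ (pool chosen : List Int) (state : Int) (i f : Nat) :
    sampleLoopA pool chosen state i (f + 1)
      = if pool.isEmpty then chosen
        else
          sampleLoopA ((PySem.List.pop? pool (PySem.Int.mod (mix64 (state + (i : Int) + 1)) (pool.length : Int))).getD (0, [])).2
            (chosen ++ [((PySem.List.pop? pool (PySem.Int.mod (mix64 (state + (i : Int) + 1)) (pool.length : Int))).getD (0, [])).1])
            (mix64 (state + (i : Int) + 1)) (i + 1) f := rfl

theorem sampleLoopB_succ (deck : List Int) (n : Nat) (removed : List Nat) (chosen : List Int)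
    (state : Int) (i f : Nat) :
    sampleLoopB deck n removed chosen state i (f + 1)
      = if n - removed.length = 0 then chosen
        else
          sampleLoopB deck n
            (PySem.List.insert removed ((bsLoop removed ((PySem.Int.mod (mix64 (state + (i : Int) + 1)) ((n - removed.length : Nat) : Int)).toNat) 0 removed.length : Nat) : Int) (((PySem.Int.mod (mix64 (state + (i : Int) + 1)) ((n - removed.length : Nat) : Int)).toNat) + (bsLoop removed ((PySem.Int.mod (mix64 (state + (i : Int) + 1)) ((n - removed.length : Nat) : Int)).toNat) 0 removed.length)))
            (chosen ++ [deck.getD (((PySem.Int.mod (mix64 (state + (i : Int) + 1)) ((n - removed.length : Nat) : Int)).toNat) + (bsLoop removed ((PySem.Int.mod (mix64 (state + (i : Int) + 1)) ((n - removed.length : Nat) : Int)).toNat) 0 removed.length)) 0])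
            (mix64 (state + (i : Int) + 1)) (i + 1) f := rfl

-- the binary search's postcondition: k splits removed into a prefix interleaving
-- below idx+k and a suffix strictly above
def pvGood (removed : List Nat) (idx k : Nat) : Prop :=
  k ≤ removed.length ∧ (∀ j, j < k → removed.getD j 0 ≤ idx + j) ∧
    (k = removed.length ∨ idx + k < removed.getD k 0)

theorem translate_of_good : ∀ (removed : List Nat) (idx k : Nat),
    pvGood removed idx k → pvTranslate removed idx = idx + k := by
  intro removed
  induction removed with
  | nil =>
    intro idx k ⟨h1, _, _⟩
    simp only [List.length_nil, Nat.le_zero] at h1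
    subst h1
    rfl
  | cons d ds ih =>
    intro idx k ⟨h1, h2, h3⟩
    cases k with
    | zero =>
      have hd : idx < d := by
        rcases h3 with h | h
        · simp at h
        · simpa using h
      rw [pvTranslate, if_neg (by omega)]
      omega
    | succ k' =>
      have hd : d ≤ idx := by have := h2 0 (by omega); simpa using this
      have hg : pvGood ds (idx + 1) k' := by
        refine ⟨by simpa using h1, fun j hj => ?_, ?_⟩
        · have := h2 (j + 1) (by omega)
          simp only [List.getD_cons_succ] at this
          omega
        · rcases h3 with h | h
          · left; simpa using h
          · right
            simp only [List.getD_cons_succ] at h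
            omega
      rw [pvTranslate, if_pos hd, ih (idx + 1) k' hg]
      omega

theorem chain_gap (l : List Nat) (hs : l.Pairwise (· < ·)) :
    ∀ j2 j1, j1 ≤ j2 → j2 < l.length → l.getD j1 0 + (j2 - j1) ≤ l.getD j2 0 := by
  intro j2
  induction j2 with
  | zero =>
    intro j1 h _
    have : j1 = 0 := by omega
    subst this
    simp
  | succ j ihj =>
    intro j1 h12 h2
    rcases Nat.eq_or_lt_of_le h12 with rfl | hlt
    · simp
    · have hstep : l.getD j 0 < l.getD (j + 1) 0 := by
        have hp := List.pairwise_iff_getElem.mp hs j (j + 1) (by omega) (by omega) (by omega)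
        rw [List.getD_eq_getElem l 0 (by omega), List.getD_eq_getElem l 0 (by omega)]
        exact hp
      have := ihj j1 (by omega) (by omega)
      omega

theorem bs_good (removed : List Nat) (idx : Nat) (hs : removed.Pairwise (· < ·)) :
    ∀ (n lo hi : Nat), hi - lo ≤ n → lo ≤ hi → hi ≤ removed.length →
      (∀ j, j < lo → removed.getD j 0 ≤ idx + j) →
      (hi = removed.length ∨ idx + hi < removed.getD hi 0) →
      pvGood removed idx (bsLoop removed idx lo hi) := by
  intro n
  induction n with
  | zero =>
    intro lo hi hn hlh hhl h4 h5
    rw [bsLoop, if_neg (by omega)]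
    have : lo = hi := by omega
    subst this
    exact ⟨by omega, h4, h5⟩
  | succ n ihn =>
    intro lo hi hn hlh hhl h4 h5
    by_cases h : lo < hi
    · rw [bsLoop, if_pos h]
      by_cases hm : removed.getD ((lo + hi) / 2) 0 ≤ idx + (lo + hi) / 2
      · rw [if_pos hm]
        refine ihn ((lo + hi) / 2 + 1) hi (by omega) (by omega) hhl (fun j hj => ?_) h5
        have hmono := chain_gap removed hs ((lo + hi) / 2) j (by omega) (by omega)
        omega
      · rw [if_neg hm]
        exact ihn lo ((lo + hi) / 2) (by omega) (by omega) (by omega) h4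
          (Or.inr (by omega))
    · rw [bsLoop, if_neg h]
      have : lo = hi := by omega
      subst this
      exact ⟨by omega, h4, h5⟩

theorem take_drop_insertSorted : ∀ (l : List Nat) (k p : Nat), k ≤ l.length →
    (∀ j, j < k → l.getD j 0 < p) → (k = l.length ∨ p < l.getD k 0) →
    l.take k ++ p :: l.drop k = pvInsertSorted p l := by
  intro l
  induction l with
  | nil =>
    intro k p h1 _ _
    have : k = 0 := by simpa using h1
    subst this
    rfl
  | cons d ds ih =>
    intro k p h1 h2 h3
    cases k with
    | zero =>
      have hpd : p < d := by
        rcases h3 with h | h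
        · simp at h
        · simpa using h
      rw [pvInsertSorted, if_neg (by omega)]
      rfl
    | succ k' =>
      have hdp : d < p := by have := h2 0 (by omega); simpa using this
      have hrec := ih k' p (by simpa using h1)
        (fun j hj => by have := h2 (j + 1) (by omega); simpa using this)
        (by rcases h3 with hh | hh
            · left; simpa using hh
            · right; simpa using hh)
      rw [List.take_succ_cons, List.drop_succ_cons, List.cons_append, pvInsertSorted, if_pos hdp, hrec]

theorem loop_eq (deck : List Int) : ∀ (fuel : Nat) (removed : List Nat) (chosen : List Int) (state : Int) (i : Nat),
    removed.Pairwise (· < ·) → (∀ d ∈ removed, d < deck.length) →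
    sampleLoopA (selPool deck removed) chosen state i fuel = sampleLoopB deck deck.length removed chosen state i fuel := by
  intro fuel
  induction fuel with
  | zero => intro removed chosen state i _ _; rfl
  | succ f ih =>
    intro removed chosen state i hs hb
    have hnd : removed.Nodup := List.Pairwise.imp (fun h => Nat.ne_of_lt h) hs
    have hlenL : (availIdx deck.length removed).length = deck.length - removed.length :=
      length_availIdx _ _ hnd hb
    have hlen : (selPool deck removed).length = deck.length - removed.length := by
      simp [selPool, hlenL]
    rw [sampleLoopA_succ, sampleLoopB_succ]
    by_cases hemp : deck.length - removed.length = 0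
    · have hnil : selPool deck removed = [] := List.eq_nil_of_length_eq_zero (by omega)
      simp [hnil, hemp]
    · have hne : ¬ (selPool deck removed).isEmpty = true := by
        simp only [List.isEmpty_iff]
        intro hnil
        rw [hnil] at hlen
        simp at hlen
        omega
      rw [if_neg hne, if_neg hemp]
      have hst : 0 ≤ mix64 (state + (i : Int) + 1) := mix64_nonneg _
      set st := mix64 (state + (i : Int) + 1) with hstdef
      have hrempos : (0 : Int) < ((deck.length - removed.length : Nat) : Int) := by
        exact_mod_cast Nat.pos_of_ne_zero hemp
      have hmodeq : PySem.Int.mod st ((selPool deck removed).length : Int)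
          = PySem.Int.mod st ((deck.length - removed.length : Nat) : Int) := by rw [hlen]
      have hmod : 0 ≤ PySem.Int.mod st ((deck.length - removed.length : Nat) : Int) ∧
          PySem.Int.mod st ((deck.length - removed.length : Nat) : Int)
            < ((deck.length - removed.length : Nat) : Int) := by
        rw [PySem.Int.mod_eq_emod_of_pos hrempos]
        exact ⟨Int.emod_nonneg st (by omega), Int.emod_lt_of_pos st hrempos⟩
      set idxN := (PySem.Int.mod st ((deck.length - removed.length : Nat) : Int)).toNat with hidxdef
      have hidxN : idxN < deck.length - removed.length := by omega
      have hcast : PySem.Int.mod st ((selPool deck removed).length : Int) = ((idxN : Nat) : Int) := by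
        rw [hmodeq, hidxdef, Int.toNat_of_nonneg hmod.1]
      have hidxpool : idxN < (selPool deck removed).length := by omega
      have hgetL : (availIdx deck.length removed)[idxN]? = some (pvTranslate removed idxN) :=
        availIdx_get removed deck.length idxN hs hb hidxN
      have hmemL : pvTranslate removed idxN ∈ availIdx deck.length removed :=
        List.mem_of_getElem? hgetL
      have hposn : pvTranslate removed idxN < deck.length := by
        have := (List.mem_filter.mp hmemL).1
        simpa using List.mem_range.mp this
      have hposout : pvTranslate removed idxN ∉ removed := by
        have := (List.mem_filter.mp hmemL).2
        simpa using this
      have hidxL : idxN < (availIdx deck.length removed).length := by omega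
      have hLget : (availIdx deck.length removed)[idxN]'hidxL = pvTranslate removed idxN := by
        have h2 := hgetL
        rw [List.getElem?_eq_getElem hidxL] at h2
        exact Option.some.inj h2
      have hval : (selPool deck removed)[idxN]'hidxpool = deck.getD (pvTranslate removed idxN) 0 := by
        simp only [selPool]
        rw [List.getElem_map]
        rw [hLget]
      have herase : (selPool deck removed).eraseIdx idxN
          = selPool deck (pvInsertSorted (pvTranslate removed idxN) removed) := by
        simp only [selPool]
        rw [List.eraseIdx_map, availIdx_insertSorted removed deck.length idxN hs hb hidxN]
      have hpop : PySem.List.pop? (selPool deck removed)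
          (PySem.Int.mod st ((selPool deck removed).length : Int))
          = some ((selPool deck removed)[idxN]'hidxpool, (selPool deck removed).eraseIdx idxN) := by
        rw [hcast]
        exact PySem.List.pop?_natCast (selPool deck removed) idxN hidxpool
      set k0 := bsLoop removed idxN 0 removed.length with hk0
      have hgood : pvGood removed idxN k0 :=
        bs_good removed idxN hs removed.length 0 removed.length (by omega) (by omega)
          (Nat.le_refl _) (fun j hj => absurd hj (by omega)) (Or.inl rfl)
      have htr : pvTranslate removed idxN = idxN + k0 :=
        translate_of_good removed idxN k0 hgood
      have hins : PySem.List.insert removed (k0 : Int) (idxN + k0)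
          = pvInsertSorted (idxN + k0) removed := by
        rw [PySem.List.insert_natCast removed k0 _ hgood.1]
        refine take_drop_insertSorted removed k0 (idxN + k0) hgood.1 (fun j hj => ?_) ?_
        · have := hgood.2.1 j hj; omega
        · exact hgood.2.2
      rw [hpop, Option.getD_some]
      rw [hval, herase]
      rw [hins, ← htr]
      exact ih (pvInsertSorted (pvTranslate removed idxN) removed)
        (chosen ++ [deck.getD (pvTranslate removed idxN) 0]) st (i + 1)
        (pairwise_insertSorted _ _ hs hposout)
        (fun e he => by
          rcases (mem_insertSorted _ e _).mp he with rfl | he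
          · exact hposn
          · exact hb e he)

-- ===== VERDICT (by name: the statement is the Claim_ definition above) =====
theorem sample_cards_spec : Claim_equal_sample_cards := by
  intro seed sample_idx deck take _
  unfold Spec_sample_cards sample_cards sample_cards_alt
  have h := loop_eq deck take.toNat [] []
    (PySem.Int.band (seed + 0x9E3779B97F4A7C15 * (sample_idx + 1)) pvMASK64) 0
    (List.Pairwise.nil) (by simp)
  simpa [selPool_nil] using h
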